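-- pv_equiv track=rewrite | github.com/PEROPOROBTANTE/F.A.R.F.A.N-MECHANISTIC_POLICY_PIPELINE_FINAL | update_all_executors.py | generate_method_sequence_code
-- ===== SOURCE A (Python) =====
-- def generate_method_sequence_code(methods, indent=12):
--     """Generate Python code for _get_method_sequence method."""
--     spaces = ' ' * indent
--     lines = ['return [']
--
--     current_class = None
--     for class_name, method_name in methods:
--         # Add comment when class changes
--         if class_name != current_class:
--             if current_class is not None:
--                 lines.append('')  # Blank line between classes
--             # Get class abbreviation comment
--             abbrev = get_class_abbreviation(class_name)
--             lines.append(f'{spaces}# {abbrev}: {class_name}')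
--             current_class = class_name
--
--         lines.append(f"{spaces}('{class_name}', '{method_name}'),")
--
--     lines.append(f'{spaces[:-4]}]')  # Dedent for closing bracket
--     return '\n'.join(lines)
--
-- def get_class_abbreviation(class_name):
--     """Get abbreviation for class based on catalog."""
--     mapping = {
--         'IndustrialPolicyProcessor': 'PP',
--         'PolicyTextProcessor': 'PP',
--         'BayesianEvidenceScorer': 'PP',
--         'PolicyContradictionDetector': 'CD',
--         'BayesianConfidenceCalculator': 'CD',
--         'TemporalLogicVerifier': 'CD',
--         'PDETMunicipalPlanAnalyzer': 'FV',
--         'FinancialAuditor': 'FV',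
--         'BeachEvidentialTest': 'DB',
--         'BayesianMechanismInference': 'DB',
--         'CausalExtractor': 'DB',
--         'MechanismPartExtractor': 'DB',
--         'CausalInferenceSetup': 'DB',
--         'OperationalizationAuditor': 'DB',
--         'CDAFFramework': 'DB',
--         'PolicyAnalysisEmbedder': 'EP',
--         'BayesianNumericalAnalyzer': 'EP',
--         'SemanticAnalyzer': 'A1',
--         'PerformanceAnalyzer': 'A1',
--         'TextMiningEngine': 'A1',
--         'MunicipalOntology': 'A1',
--         'TeoriaCambio': 'TC',
--         'AdvancedDAGValidator': 'TC',
--         'SemanticProcessor': 'SC',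
--         'ReportAssembler': 'RA',
--     }
--     return mapping.get(class_name, '??')
-- ===== SOURCE B (Python) =====
-- ABBREV_GROUPS = [
--     ('PP', ['IndustrialPolicyProcessor', 'PolicyTextProcessor', 'BayesianEvidenceScorer']),
--     ('CD', ['PolicyContradictionDetector', 'BayesianConfidenceCalculator', 'TemporalLogicVerifier']),
--     ('FV', ['PDETMunicipalPlanAnalyzer', 'FinancialAuditor']),
--     ('DB', ['BeachEvidentialTest', 'BayesianMechanismInference', 'CausalExtractor',
--             'MechanismPartExtractor', 'CausalInferenceSetup', 'OperationalizationAuditor',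
--             'CDAFFramework']),
--     ('EP', ['PolicyAnalysisEmbedder', 'BayesianNumericalAnalyzer']),
--     ('A1', ['SemanticAnalyzer', 'PerformanceAnalyzer', 'TextMiningEngine', 'MunicipalOntology']),
--     ('TC', ['TeoriaCambio', 'AdvancedDAGValidator']),
--     ('SC', ['SemanticProcessor']),
--     ('RA', ['ReportAssembler']),
-- ]
--
--
-- def get_class_abbreviation(class_name):
--     """Get abbreviation for class based on catalog (grouped by abbreviation)."""
--     for abbrev, classes in ABBREV_GROUPS:
--         if class_name in classes:
--             return abbrev
--     return '??'
--
--
-- def generate_method_sequence_code(methods, indent=12):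
--     """Generate Python code for _get_method_sequence method."""
--     spaces = ' ' * indent
--     out = 'return ['
--     i, n = 0, len(methods)
--     while i < n:
--         cls = methods[i][0]
--         k = i + 1
--         while k < n and methods[k][0] == cls:
--             k += 1
--         if i > 0:
--             out += '\n'  # blank line between class runs
--         out += '\n' + spaces + '# ' + get_class_abbreviation(cls) + ': ' + cls
--         for _, m in methods[i:k]:
--             out += '\n' + spaces + "('" + cls + "', '" + m + "'),"
--         i = k
--     return out + '\n' + ' ' * max(indent - 4, 0) + ']'
-- ===== Notes on version B (the rewrite author's own statement) =====
-- stated objective: alternative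
-- what changed: B drops A's lines list, current_class state and final '\n'.join: a while-loop scans each maximal run of one class and appends its newline-prefixed text directly to a single output string, abbreviations come from a catalog grouped by abbreviation searched linearly instead of a 25-entry flat dict, and the closing indent is computed as max(indent-4,0) instead of slicing spaces[:-4].
import Mathlib
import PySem

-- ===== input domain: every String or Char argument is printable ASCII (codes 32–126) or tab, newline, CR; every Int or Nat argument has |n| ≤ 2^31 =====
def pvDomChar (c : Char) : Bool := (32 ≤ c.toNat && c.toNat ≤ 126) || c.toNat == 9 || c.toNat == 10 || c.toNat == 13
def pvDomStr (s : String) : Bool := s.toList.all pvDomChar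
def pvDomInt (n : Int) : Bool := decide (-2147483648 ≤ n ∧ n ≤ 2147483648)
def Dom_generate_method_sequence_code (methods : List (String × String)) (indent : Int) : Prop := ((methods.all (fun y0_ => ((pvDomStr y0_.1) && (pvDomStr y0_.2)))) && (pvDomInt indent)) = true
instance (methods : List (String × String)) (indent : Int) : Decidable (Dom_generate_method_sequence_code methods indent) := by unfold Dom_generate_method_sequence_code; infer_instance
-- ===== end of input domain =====

-- B replaces A's lines-list + current_class state machine + '\n'.join by a run-scanning loop that
-- appends text directly to one accumulator, an abbreviation catalog grouped by abbreviation, and a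
-- closing indent computed as max(indent-4,0) (objective: alternative decomposition; same cost).

-- ===== PORT A =====
-- port of get_class_abbreviation (dict literal + .get with default '??')
def gmsc_abbrev (class_name : String) : String :=
  (PySem.Dict.mk [
    ("IndustrialPolicyProcessor", "PP"), ("PolicyTextProcessor", "PP"), ("BayesianEvidenceScorer", "PP"),
    ("PolicyContradictionDetector", "CD"), ("BayesianConfidenceCalculator", "CD"), ("TemporalLogicVerifier", "CD"),
    ("PDETMunicipalPlanAnalyzer", "FV"), ("FinancialAuditor", "FV"),
    ("BeachEvidentialTest", "DB"), ("BayesianMechanismInference", "DB"), ("CausalExtractor", "DB"),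
    ("MechanismPartExtractor", "DB"), ("CausalInferenceSetup", "DB"), ("OperationalizationAuditor", "DB"),
    ("CDAFFramework", "DB"),
    ("PolicyAnalysisEmbedder", "EP"), ("BayesianNumericalAnalyzer", "EP"),
    ("SemanticAnalyzer", "A1"), ("PerformanceAnalyzer", "A1"), ("TextMiningEngine", "A1"), ("MunicipalOntology", "A1"),
    ("TeoriaCambio", "TC"), ("AdvancedDAGValidator", "TC"),
    ("SemanticProcessor", "SC"), ("ReportAssembler", "RA")]).getD class_name "??"

-- A's f-string pieces, on List Char
def gmsc_comment (spaces : List Char) (c : String) : List Char :=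
  spaces ++ ('#' :: ' ' :: (gmsc_abbrev c).toList) ++ (':' :: ' ' :: c.toList)
def gmsc_tuple (spaces : List Char) (c m : String) : List Char :=
  spaces ++ ('(' :: '\'' :: c.toList) ++ ('\'' :: ',' :: ' ' :: '\'' :: m.toList) ++ ['\'', ')', ',']
def gmsc_ret : List Char := "return [".toList
-- f'{spaces[:-4]}]'
def gmsc_close (spaces : List Char) : List Char := PySem.Chars.slice spaces none (some (-4)) ++ [']']

-- A's loop body: state = (lines, current_class)
def gmsc_stepA (spaces : List Char) (st : List (List Char) × Option String) (p : String × String) :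
    List (List Char) × Option String :=
  let st2 := if some p.1 ≠ st.2 then
      ((if st.2.isSome then st.1 ++ [([] : List Char)] else st.1) ++ [gmsc_comment spaces p.1], some p.1)
    else st
  (st2.1 ++ [gmsc_tuple spaces p.1 p.2], st2.2)

def generate_method_sequence_code (methods : List (String × String)) (indent : Int) : String :=
  -- ' ' * indent: empty for indent ≤ 0, which Int.toNat matches exactly
  let spaces : List Char := List.replicate indent.toNat ' '
  let fin := methods.foldl (gmsc_stepA spaces) ([gmsc_ret], none)
  String.ofList (PySem.Chars.join ['\n'] (fin.1 ++ [gmsc_close spaces]))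

-- ===== PORT B =====
-- B's abbreviation catalog, grouped by abbreviation; looked up by linear search over the groups
def gmsc_catalog : List (String × List String) := [
  ("PP", ["IndustrialPolicyProcessor", "PolicyTextProcessor", "BayesianEvidenceScorer"]),
  ("CD", ["PolicyContradictionDetector", "BayesianConfidenceCalculator", "TemporalLogicVerifier"]),
  ("FV", ["PDETMunicipalPlanAnalyzer", "FinancialAuditor"]),
  ("DB", ["BeachEvidentialTest", "BayesianMechanismInference", "CausalExtractor",
          "MechanismPartExtractor", "CausalInferenceSetup", "OperationalizationAuditor",
          "CDAFFramework"]),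
  ("EP", ["PolicyAnalysisEmbedder", "BayesianNumericalAnalyzer"]),
  ("A1", ["SemanticAnalyzer", "PerformanceAnalyzer", "TextMiningEngine", "MunicipalOntology"]),
  ("TC", ["TeoriaCambio", "AdvancedDAGValidator"]),
  ("SC", ["SemanticProcessor"]),
  ("RA", ["ReportAssembler"])]

def gmsc_abbrev_alt (class_name : String) : String :=
  match gmsc_catalog.find? (fun g => g.2.contains class_name) with
  | some g => g.1
  | none => "??"

-- B's while-loop over maximal class runs: started flag + one output accumulator, appended in place
def gmsc_build (spaces : List Char) (acc : List Char) (started : Bool) :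
    List (String × String) → List Char
  | [] => acc
  | (c, m) :: rest =>
      let run := (c, m) :: rest.takeWhile (fun p => p.1 == c)
      let acc1 := if started then acc ++ ['\n'] else acc
      let acc2 := acc1 ++ ('\n' :: spaces) ++ ('#' :: ' ' :: (gmsc_abbrev_alt c).toList) ++ (':' :: ' ' :: c.toList)
        ++ run.flatMap (fun p =>
            ('\n' :: spaces) ++ ('(' :: '\'' :: c.toList) ++ ('\'' :: ',' :: ' ' :: '\'' :: p.2.toList) ++ ['\'', ')', ','])
      gmsc_build spaces acc2 true (rest.dropWhile (fun p => p.1 == c))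
  termination_by ms => ms.length
  decreasing_by
    simp only [List.length_cons]
    exact Nat.lt_succ_of_le (List.length_dropWhile_le _ _)

def generate_method_sequence_code_alt (methods : List (String × String)) (indent : Int) : String :=
  let spaces : List Char := List.replicate indent.toNat ' '
  let body := gmsc_build spaces "return [".toList false methods
  String.ofList (body ++ '\n' :: (List.replicate (max (indent - 4) 0).toNat ' ' ++ [']']))

-- ===== PRECONDITION & SPEC =====
def Spec_generate_method_sequence_code (methods : List (String × String)) (indent : Int) (out : String) : Prop := out = generate_method_sequence_code_alt methods indent
instance (methods : List (String × String)) (indent : Int) (out : String) : Decidable (Spec_generate_method_sequence_code methods indent out) := by unfold Spec_generate_method_sequence_code; infer_instance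

-- ===== CLAIM (what is proved, stated in full; the proofs are below) =====
def Claim_equal_generate_method_sequence_code : Prop := ∀ (methods : List (String × String)) (indent : Int), Dom_generate_method_sequence_code methods indent → Spec_generate_method_sequence_code methods indent (generate_method_sequence_code methods indent)

-- ===== LEMMAS AND PROOFS =====

theorem gmsc_abbrev_eq (c : String) : gmsc_abbrev_alt c = gmsc_abbrev c := by
  by_cases h0 : c = "IndustrialPolicyProcessor"
  · subst h0; decide
  by_cases h1 : c = "PolicyTextProcessor"
  · subst h1; decide
  by_cases h2 : c = "BayesianEvidenceScorer"
  · subst h2; decide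
  by_cases h3 : c = "PolicyContradictionDetector"
  · subst h3; decide
  by_cases h4 : c = "BayesianConfidenceCalculator"
  · subst h4; decide
  by_cases h5 : c = "TemporalLogicVerifier"
  · subst h5; decide
  by_cases h6 : c = "PDETMunicipalPlanAnalyzer"
  · subst h6; decide
  by_cases h7 : c = "FinancialAuditor"
  · subst h7; decide
  by_cases h8 : c = "BeachEvidentialTest"
  · subst h8; decide
  by_cases h9 : c = "BayesianMechanismInference"
  · subst h9; decide
  by_cases h10 : c = "CausalExtractor"
  · subst h10; decide
  by_cases h11 : c = "MechanismPartExtractor"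
  · subst h11; decide
  by_cases h12 : c = "CausalInferenceSetup"
  · subst h12; decide
  by_cases h13 : c = "OperationalizationAuditor"
  · subst h13; decide
  by_cases h14 : c = "CDAFFramework"
  · subst h14; decide
  by_cases h15 : c = "PolicyAnalysisEmbedder"
  · subst h15; decide
  by_cases h16 : c = "BayesianNumericalAnalyzer"
  · subst h16; decide
  by_cases h17 : c = "SemanticAnalyzer"
  · subst h17; decide
  by_cases h18 : c = "PerformanceAnalyzer"
  · subst h18; decide
  by_cases h19 : c = "TextMiningEngine"
  · subst h19; decide
  by_cases h20 : c = "MunicipalOntology"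
  · subst h20; decide
  by_cases h21 : c = "TeoriaCambio"
  · subst h21; decide
  by_cases h22 : c = "AdvancedDAGValidator"
  · subst h22; decide
  by_cases h23 : c = "SemanticProcessor"
  · subst h23; decide
  by_cases h24 : c = "ReportAssembler"
  · subst h24; decide
  simp [gmsc_abbrev, gmsc_abbrev_alt, gmsc_catalog, PySem.Dict.getD, PySem.Dict.get?_mk_cons, PySem.Dict.get?, List.find?_cons, h0, h1, h2, h3, h4, h5, h6, h7, h8, h9, h10, h11, h12, h13, h14, h15, h16, h17, h18, h19, h20, h21, h22, h23, h24, Ne.symm h0, Ne.symm h1, Ne.symm h2, Ne.symm h3, Ne.symm h4, Ne.symm h5, Ne.symm h6, Ne.symm h7, Ne.symm h8, Ne.symm h9, Ne.symm h10, Ne.symm h11, Ne.symm h12, Ne.symm h13, Ne.symm h14, Ne.symm h15, Ne.symm h16, Ne.symm h17, Ne.symm h18, Ne.symm h19, Ne.symm h20, Ne.symm h21, Ne.symm h22, Ne.symm h23, Ne.symm h24]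

-- consecutive grouping of the methods list (proof-only view shared by both characterizations)
def gmsc_groups : List (String × String) → List (String × List String)
  | [] => []
  | (c, m) :: rest =>
      (c, m :: (rest.takeWhile (fun p => p.1 == c)).map Prod.snd) ::
        gmsc_groups (rest.dropWhile (fun p => p.1 == c))
  termination_by ms => ms.length
  decreasing_by
    simp only [List.length_cons]
    exact Nat.lt_succ_of_le (List.length_dropWhile_le _ _)

-- the lines A emits for one group
def gmsc_gLines (spaces : List Char) (g : String × List String) : List (List Char) :=
  gmsc_comment spaces g.1 :: g.2.map (fun m => gmsc_tuple spaces g.1 m)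

-- lines for a tail of groups, each preceded by the blank separator line
def gmsc_bodyTail (spaces : List Char) : List (String × List String) → List (List Char)
  | [] => []
  | g :: gs => ([] : List Char) :: gmsc_gLines spaces g ++ gmsc_bodyTail spaces gs

theorem gmsc_head?_dropWhile {α} (p : α → Bool) (l : List α) (x : α)
    (h : (l.dropWhile p).head? = some x) : p x = false := by
  induction l with
  | nil => simp [List.dropWhile] at h
  | cons a l ih =>
    by_cases hp : p a
    · rw [List.dropWhile_cons_of_pos hp] at h; exact ih h
    · rw [List.dropWhile_cons_of_neg hp] at h
      simp at h; subst h; simpa using hp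

-- within a run of class c with current_class = c, the loop only appends tuple lines
theorem gmsc_foldl_run (spaces : List Char) (c : String) (ms : List (String × String))
    (h : ∀ p ∈ ms, p.1 = c) (lines : List (List Char)) :
    ms.foldl (gmsc_stepA spaces) (lines, some c) =
      (lines ++ ms.map (fun p => gmsc_tuple spaces p.1 p.2), some c) := by
  induction ms generalizing lines with
  | nil => simp
  | cons p ms ih =>
    have hp : p.1 = c := h p (by simp)
    rw [List.foldl_cons]
    have hstep : gmsc_stepA spaces (lines, some c) p =
        (lines ++ [gmsc_tuple spaces p.1 p.2], some c) := by
      simp [gmsc_stepA, hp]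
    rw [hstep, ih (fun q hq => h q (by simp [hq]))]
    simp

-- from current_class = some c with the head's class ≠ c, the loop appends "" then the groups' lines
theorem gmsc_foldl_some (spaces : List Char) (ms : List (String × String)) :
    ∀ (c : String), (∀ p, ms.head? = some p → p.1 ≠ c) → ∀ lines : List (List Char),
    (ms.foldl (gmsc_stepA spaces) (lines, some c)).1 =
      lines ++ gmsc_bodyTail spaces (gmsc_groups ms) := by
  induction ms using gmsc_groups.induct with
  | case1 => intro c _ lines; simp [gmsc_groups, gmsc_bodyTail]
  | case2 c' m rest ih =>
    intro c hb lines
    have hc : c' ≠ c := hb (c', m) rfl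
    rw [List.foldl_cons]
    have hstep : gmsc_stepA spaces (lines, some c) (c', m) =
        (lines ++ [([] : List Char)] ++ [gmsc_comment spaces c'] ++ [gmsc_tuple spaces c' m], some c') := by
      simp [gmsc_stepA, hc]
    rw [hstep]
    rw [show rest = rest.takeWhile (fun p => p.1 == c') ++ rest.dropWhile (fun p => p.1 == c')
        from (List.takeWhile_append_dropWhile).symm]
    rw [List.foldl_append]
    rw [gmsc_foldl_run spaces c' _ (fun p hp => by
      have := List.mem_takeWhile_imp hp; simpa using this)]
    rw [ih c' (fun p hp => by
      have := gmsc_head?_dropWhile (fun p => p.1 == c') rest p hp; simpa using this)]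
    have hmap : (rest.takeWhile (fun p => p.1 == c')).map (fun p => gmsc_tuple spaces p.1 p.2) =
        ((rest.takeWhile (fun p => p.1 == c')).map Prod.snd).map (fun m => gmsc_tuple spaces c' m) := by
      rw [List.map_map]
      exact List.map_congr_left (fun p hp => by
        have := List.mem_takeWhile_imp hp; simp at this; simp [this])
    simp [gmsc_groups, gmsc_bodyTail, gmsc_gLines, hmap]

-- the whole loop from current_class = None
theorem gmsc_foldl_none (spaces : List Char) (ms : List (String × String)) (lines : List (List Char)) :
    (ms.foldl (gmsc_stepA spaces) (lines, none)).1 =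
      lines ++ (match gmsc_groups ms with
        | [] => []
        | g :: gs => gmsc_gLines spaces g ++ gmsc_bodyTail spaces gs) := by
  cases ms with
  | nil => simp [gmsc_groups]
  | cons p rest =>
    obtain ⟨c, m⟩ := p
    rw [List.foldl_cons]
    have hstep : gmsc_stepA spaces (lines, none) (c, m) =
        (lines ++ [gmsc_comment spaces c] ++ [gmsc_tuple spaces c m], some c) := by
      simp [gmsc_stepA]
    rw [hstep]
    rw [show rest = rest.takeWhile (fun p => p.1 == c) ++ rest.dropWhile (fun p => p.1 == c)
        from (List.takeWhile_append_dropWhile).symm]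
    rw [List.foldl_append]
    rw [gmsc_foldl_run spaces c _ (fun p hp => by
      have := List.mem_takeWhile_imp hp; simpa using this)]
    rw [gmsc_foldl_some spaces _ c (fun p hp => by
      have := gmsc_head?_dropWhile (fun p => p.1 == c) rest p hp; simpa using this)]
    have hmap : (rest.takeWhile (fun p => p.1 == c)).map (fun p => gmsc_tuple spaces p.1 p.2) =
        ((rest.takeWhile (fun p => p.1 == c)).map Prod.snd).map (fun m => gmsc_tuple spaces c m) := by
      rw [List.map_map]
      exact List.map_congr_left (fun p hp => by
        have := List.mem_takeWhile_imp hp; simp at this; simp [this])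
    simp [gmsc_groups, gmsc_gLines, hmap]

-- '\n'.join as head ++ newline-prefixed tail
theorem gmsc_join_flatMap (a : List Char) (ls : List (List Char)) :
    PySem.Chars.join ['\n'] (a :: ls) = a ++ ls.flatMap (fun l => '\n' :: l) := by
  induction ls generalizing a with
  | nil => simp [PySem.Chars.join_singleton]
  | cons b ls ih => rw [PySem.Chars.join_cons_cons, ih b]; simp

-- from started = true, the builder appends each remaining group preceded by a blank line
theorem gmsc_build_true (spaces : List Char) (ms : List (String × String)) :
    ∀ acc, gmsc_build spaces acc true ms =
      acc ++ (gmsc_bodyTail spaces (gmsc_groups ms)).flatMap (fun l => '\n' :: l) := by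
  induction ms using gmsc_groups.induct with
  | case1 => intro acc; simp [gmsc_build, gmsc_groups, gmsc_bodyTail]
  | case2 c m rest ih =>
    intro acc
    rw [gmsc_build, gmsc_groups]
    rw [ih]
    simp [gmsc_bodyTail, gmsc_gLines, gmsc_comment, gmsc_tuple, gmsc_abbrev_eq,
      List.flatMap_cons, List.flatMap_map, List.map_map, Function.comp]

-- the first group (started = false) gets no blank line; after it the true-case applies
theorem gmsc_build_false (spaces : List Char) (ms : List (String × String)) (acc : List Char)
    (h : ms ≠ []) :
    gmsc_build spaces acc false ms =
      acc ++ (match gmsc_groups ms with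
        | [] => []
        | g :: gs => gmsc_gLines spaces g ++ gmsc_bodyTail spaces gs).flatMap (fun l => '\n' :: l) := by
  cases ms with
  | nil => exact absurd rfl h
  | cons p rest =>
    obtain ⟨c, m⟩ := p
    rw [gmsc_build, gmsc_groups]
    rw [gmsc_build_true]
    simp [gmsc_bodyTail, gmsc_gLines, gmsc_comment, gmsc_tuple, gmsc_abbrev_eq,
      List.flatMap_cons, List.flatMap_map, List.map_map, Function.comp]

-- ===== VERDICT (by name: the statement is the Claim_ definition above) =====
theorem generate_method_sequence_code_spec : Claim_equal_generate_method_sequence_code := by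
  intro methods indent _
  unfold Spec_generate_method_sequence_code
  unfold generate_method_sequence_code generate_method_sequence_code_alt
  simp only []
  set spaces : List Char := List.replicate indent.toNat ' ' with hs
  congr 1
  rw [gmsc_foldl_none]
  have hclose : gmsc_close spaces = List.replicate (max (indent - 4) 0).toNat ' ' ++ [']'] := by
    rw [gmsc_close, hs, PySem.Chars.slice_eq_listSlice, PySem.List.slice_to_neg_ofNat _ 4 (by omega)]
    rw [List.take_replicate, List.length_replicate]
    congr 2
    omega
  rw [show [gmsc_ret] ++ (match gmsc_groups methods with
        | [] => []
        | g :: gs => gmsc_gLines spaces g ++ gmsc_bodyTail spaces gs) ++ [gmsc_close spaces] =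
      gmsc_ret :: ((match gmsc_groups methods with
        | [] => []
        | g :: gs => gmsc_gLines spaces g ++ gmsc_bodyTail spaces gs) ++ [gmsc_close spaces]) by simp]
  rw [gmsc_join_flatMap]
  cases hm : methods with
  | nil => simp [gmsc_groups, hclose, gmsc_ret, gmsc_build]
  | cons p rest =>
    rw [← hm]
    have hne : methods ≠ [] := by simp [hm]
    rw [List.flatMap_append, gmsc_build_false spaces methods "return [".toList hne]
    simp [hclose, gmsc_ret]
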